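-- pv_equiv track=rewrite | github.com/ImHyeonSu/programmingtest | leetcode/leetCode_python_492.py | constructRectangle
-- ===== SOURCE A (Python) =====
-- def constructRectangle(area: int) -> list[int]:
--     result = []
--     before_size = 0
--     if area == 1:
--         return [1, 1]
--     for i in range(1, area):
--         if area % i == 0:
--             tmp_num = area // i
--             if i == 1 or before_size >= max(i, tmp_num) - min(i, tmp_num):
--                 before_size = max(i, tmp_num) - min(i, tmp_num)
--                 result = [max(i, tmp_num), min(i, tmp_num)]
--     return result
-- ===== SOURCE B (Python) =====
-- def constructRectangle(area: int) -> list[int]: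
--     if area <= 0:
--         return []
--     i = 1
--     w = 1
--     while i * i <= area:
--         if area % i == 0:
--             w = i
--         i += 1
--     return [area // w, w]
-- ===== Notes on version B (the rewrite author's own statement) =====
-- stated objective: faster
-- what changed: B scans candidate widths only up to sqrt(area), keeping the largest divisor whose square does not exceed area, instead of A's scan over every i in range(1, area) with a running best-difference update.
import Mathlib
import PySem

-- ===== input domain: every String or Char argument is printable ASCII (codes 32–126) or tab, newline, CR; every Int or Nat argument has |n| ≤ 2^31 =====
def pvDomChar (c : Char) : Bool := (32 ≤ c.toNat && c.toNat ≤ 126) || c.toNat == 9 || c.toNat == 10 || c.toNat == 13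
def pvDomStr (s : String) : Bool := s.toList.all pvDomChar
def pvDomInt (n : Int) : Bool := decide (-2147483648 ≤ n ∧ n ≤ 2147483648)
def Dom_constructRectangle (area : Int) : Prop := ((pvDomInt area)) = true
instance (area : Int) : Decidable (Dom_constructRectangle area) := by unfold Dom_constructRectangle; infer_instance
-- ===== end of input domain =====

-- B scans divisors only up to sqrt(area) (keeping the largest divisor whose square is ≤ area)
-- instead of A's scan over all of range(1, area); objective: faster (asymptotic, O(sqrt) vs O(area)).

-- ===== PORT A =====
def aStep (area : Int) (st : List Int × Int) (i : Int) : List Int × Int :=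
  if PySem.Int.mod area i = 0 then
    let t := PySem.Int.floordiv area i
    if i = 1 ∨ st.2 ≥ max i t - min i t then
      ([max i t, min i t], max i t - min i t)
    else st
  else st

def constructRectangle (area : Int) : List Int :=
  if area = 1 then [1, 1]
  else ((PySem.List.pyRange 1 area 1).foldl (aStep area) ([], 0)).1

-- ===== PORT B =====
-- the while loop, with a fuel counter as the structural totality guard
-- ((area + 1).toNat bounds the number of iterations: the loop exits once i * i > area)
def altLoop (fuel : Nat) (area i w : Int) : Int :=
  match fuel with
  | 0 => w
  | fuel + 1 =>
      if i * i ≤ area then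
        altLoop fuel area (i + 1) (if PySem.Int.mod area i = 0 then i else w)
      else w

def constructRectangle_alt (area : Int) : List Int :=
  if area ≤ 0 then []
  else
    let w := altLoop (area + 1).toNat area 1 1
    [PySem.Int.floordiv area w, w]

-- ===== PRECONDITION & SPEC =====
def Spec_constructRectangle (area : Int) (out : List Int) : Prop := out = constructRectangle_alt area
instance (area : Int) (out : List Int) : Decidable (Spec_constructRectangle area out) := by unfold Spec_constructRectangle; infer_instance

-- ===== CLAIM (what is proved, stated in full; the proofs are below) =====
def Claim_equal_constructRectangle : Prop := ∀ (area : Int), Dom_constructRectangle area → Spec_constructRectangle area (constructRectangle area)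

-- ===== LEMMAS AND PROOFS =====

-- bw area n = the largest j ∈ [1, n] with j ∣ area and j*j ≤ area (1 if none); the common invariant value.
def bw (area : Int) : Nat → Int
  | 0 => 1
  | n+1 => if ((n : Int) + 1) ∣ area ∧ ((n : Int) + 1) * ((n : Int) + 1) ≤ area
           then (n : Int) + 1 else bw area n

lemma bw_facts (area : Int) (h1 : 1 ≤ area) : ∀ n : Nat,
    bw area n ∣ area ∧ 1 ≤ bw area n ∧ bw area n ≤ max 1 (n : Int) ∧
    bw area n * bw area n ≤ area ∧
    ∀ j : Int, 1 ≤ j → j ≤ (n : Int) → j ∣ area → j * j ≤ area → j ≤ bw area n := by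
  intro n
  induction n with
  | zero =>
      refine ⟨one_dvd _, le_refl _, by simp [bw], by simpa [bw] using h1, ?_⟩
      intro j hj hj0 _ _; simp at hj0; omega
  | succ n ih =>
      obtain ⟨ihd, ih1, ihle, ihsq, ihmax⟩ := ih
      by_cases hc : ((n : Int) + 1) ∣ area ∧ ((n : Int) + 1) * ((n : Int) + 1) ≤ area
      · have hbw : bw area (n+1) = (n : Int) + 1 := by simp [bw, hc]
        rw [hbw]
        refine ⟨hc.1, by omega, by omega, hc.2, ?_⟩
        intro j _ hj2 _ _; push_cast at hj2; omega
      · have hbw : bw area (n+1) = bw area n := by simp [bw, hc]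
        rw [hbw]
        refine ⟨ihd, ih1, ?_, ihsq, ?_⟩
        · have : max 1 (n : Int) ≤ max 1 ((n : Int) + 1) := by omega
          push_cast at this ⊢; omega
        · intro j hj1 hj2 hjd hjs
          push_cast at hj2
          rcases lt_or_eq_of_le hj2 with hlt | heq
          · exact ihmax j hj1 (by omega) hjd hjs
          · exfalso; exact hc ⟨heq ▸ hjd, heq ▸ hjs⟩

lemma bw_const (area : Int) : ∀ (n m : Nat), m ≤ n →
    area < ((m : Int) + 1) * ((m : Int) + 1) → bw area n = bw area m := by
  intro n
  induction n with
  | zero => intro m hm _; interval_cases m; rfl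
  | succ n ih =>
      intro m hm hsq
      rcases Nat.eq_or_lt_of_le hm with heq | hlt
      · rw [heq]
      · have hmn : m ≤ n := by omega
        have hbig : ¬ (((n : Int) + 1) ∣ area ∧ ((n : Int) + 1) * ((n : Int) + 1) ≤ area) := by
          rintro ⟨-, hle⟩
          have hcast : (m : Int) + 1 ≤ (n : Int) + 1 := by omega
          nlinarith
        rw [show bw area (n+1) = bw area n from by simp [bw, hbig]]
        exact ih m hmn hsq

lemma altLoop_bw (area : Int) (h1 : 1 ≤ area) (K : Nat)
    (hK : area < ((K : Int) + 1) * ((K : Int) + 1)) :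
    ∀ fuel : Nat, ∀ i : Int, (area + 1 - i).toNat ≤ fuel → 1 ≤ i → i ≤ (K : Int) + 1 →
    altLoop fuel area i (bw area (i - 1).toNat) = bw area K := by
  intro fuel
  induction fuel with
  | zero =>
      intro i hfuel hi1 hiK
      show bw area (i - 1).toNat = bw area K
      have hsq : area < (((i - 1).toNat : Int) + 1) * (((i - 1).toNat : Int) + 1) := by
        have hc : ((i - 1).toNat : Int) + 1 = i := by omega
        rw [hc]
        have hia : area + 1 ≤ i := by omega
        nlinarith
      exact (bw_const area K (i - 1).toNat (by omega) hsq).symm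
  | succ fuel ih =>
      intro i hfuel hi1 hiK
      show (if i * i ≤ area then _ else _) = _
      by_cases hii : i * i ≤ area
      · rw [if_pos hii]
        have hwi : (if PySem.Int.mod area i = 0 then i else bw area (i - 1).toNat)
            = bw area ((i + 1) - 1).toNat := by
          have hn : ((i + 1) - 1).toNat = (i - 1).toNat + 1 := by omega
          rw [hn, bw]
          have hcast : (((i - 1).toNat : Int)) + 1 = i := by omega
          rw [hcast]
          simp only [PySem.Int.mod_eq_zero_iff_dvd]
          by_cases hd : i ∣ area
          · simp [hd, hii]
          · simp [hd]
        rw [hwi]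
        have hlt : i < (K : Int) + 1 := by nlinarith
        exact ih (i + 1) (by omega) (by omega) (by omega)
      · rw [if_neg hii]
        have hsq : area < (((i - 1).toNat : Int) + 1) * (((i - 1).toNat : Int) + 1) := by
          have : ((i - 1).toNat : Int) + 1 = i := by omega
          rw [this]; omega
        exact (bw_const area K (i - 1).toNat (by omega) hsq).symm

lemma A_fold (area : Int) (h2 : 2 ≤ area) :
    ∀ n : Nat, 1 ≤ n → (n : Int) + 1 ≤ area →
    (PySem.List.pyRange 1 ((n : Int) + 1) 1).foldl (aStep area) ([], 0)
      = ([PySem.Int.floordiv area (bw area n), bw area n],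
         PySem.Int.floordiv area (bw area n) - bw area n) := by
  intro n
  induction n with
  | zero => intro h _; exact absurd h (by omega)
  | succ n ih =>
      intro _ hle
      by_cases hn0 : n = 0
      · subst hn0
        have hc2 : (((0:Nat)+1 : Nat) : Int) + 1 = 2 := by norm_num
        have hr : PySem.List.pyRange 1 2 1 = [1] := by
          rw [PySem.List.pyRange_one_cons (by omega), PySem.List.pyRange_one_eq_nil (by omega)]
        rw [hc2, hr]
        have hbw1 : bw area ((0:Nat)+1) = 1 := by simp [bw]
        have hfd : PySem.Int.floordiv area 1 = area := by
          rw [PySem.Int.floordiv_eq_ediv_of_pos (by omega)]; exact Int.ediv_one area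
        have hmod : PySem.Int.mod area 1 = 0 := by
          rw [PySem.Int.mod_eq_zero_iff_dvd]; exact one_dvd area
        simp only [List.foldl, aStep, hmod, if_pos, hfd, hbw1]
        rw [if_pos (Or.inl trivial)]
        have hmax : max (1:Int) area = area := max_eq_right (by omega)
        have hmin : min (1:Int) area = 1 := min_eq_left (by omega)
        rw [hmax, hmin]
      · have hn1 : 1 ≤ n := by omega
        have hle' : (n : Int) + 1 ≤ area := by push_cast at hle; omega
        have IH := ih hn1 hle'
        have hsplit : PySem.List.pyRange 1 (((n+1 : Nat) : Int) + 1) 1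
            = PySem.List.pyRange 1 ((n : Int) + 1) 1 ++ [(n : Int) + 1] := by
          have h := PySem.List.pyRange_one_succ_right (a := 1) (b := (n : Int) + 1) (by omega)
          have hc : ((n+1 : Nat) : Int) + 1 = ((n : Int) + 1) + 1 := by push_cast; ring
          rw [hc, h]
        rw [hsplit, List.foldl_append, IH]
        obtain ⟨hdvd, hd1, hdle, hdsq, hdmax⟩ := bw_facts area (by omega) n
        set d := bw area n with hdname
        have hdn : d ≤ (n : Int) := by
          have : max 1 (n : Int) = (n : Int) := max_eq_right (by omega)
          omega
        set i : Int := (n : Int) + 1 with hiname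
        have hbwdef : bw area (n+1) = if i ∣ area ∧ i * i ≤ area then i else d := by
          simp only [bw]; rw [← hiname, ← hdname]
        have hfd_d : PySem.Int.floordiv area d = area / d :=
          PySem.Int.floordiv_eq_ediv_of_pos (by omega)
        have hdA : area / d * d = area := Int.ediv_mul_cancel hdvd
        by_cases hdv : i ∣ area
        · have hmod : PySem.Int.mod area i = 0 := by rw [PySem.Int.mod_eq_zero_iff_dvd]; exact hdv
          have hfd_i : PySem.Int.floordiv area i = area / i :=
            PySem.Int.floordiv_eq_ediv_of_pos (by omega)
          have hiA : area / i * i = area := Int.ediv_mul_cancel hdv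
          have hq1 : 1 ≤ area / i := (Int.le_ediv_iff_mul_le (by omega)).2 (by omega)
          by_cases hsq : i * i ≤ area
          · -- i is a new best width
            have hti : i ≤ area / i := (Int.le_ediv_iff_mul_le (by omega)).2 hsq
            have hmono : area / i ≤ area / d := by
              have hstep : area / i * d ≤ area / d * d := by
                calc area / i * d ≤ area / i * i := by nlinarith
                  _ = area := hiA
                  _ = area / d * d := hdA.symm
              exact le_of_mul_le_mul_right hstep (by omega)
            have hbw : bw area (n+1) = i := by rw [hbwdef, if_pos ⟨hdv, hsq⟩]
            simp only [List.foldl, aStep, hmod, if_pos, hfd_i]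
            rw [if_pos (Or.inr (by
              rw [max_eq_right hti, min_eq_left hti, hfd_d]
              omega))]
            rw [max_eq_right hti, min_eq_left hti, hbw, hfd_i]
          · -- i is past the square root
            have hbw : bw area (n+1) = d := by
              rw [hbwdef, if_neg (by rintro ⟨-, h⟩; exact hsq h)]
            have hti : area / i < i := by
              rw [Int.ediv_lt_iff_lt_mul (by omega)]; omega
            set e := area / i with hename
            have heD : e ∣ area := ⟨i, hiA.symm⟩
            have hesq : e * e ≤ area := by nlinarith
            have heled : e ≤ d := hdmax e hq1 (by omega) heD hesq
            simp only [List.foldl, aStep, hmod, if_pos, hfd_i]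
            rw [hbw]
            by_cases hed : e = d
            · -- the co-divisor of the best width: the update rewrites the same value
              have hieq : i = area / d := by
                have hmul : i * d = area / d * d := by
                  rw [hdA, ← hiA, hed]; ring
                exact mul_right_cancel₀ (by omega) hmul
              have hei : e ≤ i := le_of_lt hti
              rw [if_pos (Or.inr (by
                rw [max_eq_left hei, min_eq_right hei, hfd_d]
                omega))]
              rw [max_eq_left hei, min_eq_right hei, hfd_d, ← hieq, hed]
            · -- e < d: strictly worse pair, no update
              have hed' : e < d := lt_of_le_of_ne heled hed
              have hgt : area / d < i := by
                by_contra hc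
                push Not at hc
                nlinarith [hiA, hdA]
              have hei : e ≤ i := le_of_lt hti
              rw [if_neg (by
                rintro (h1 | h2)
                · omega
                · rw [max_eq_left hei, min_eq_right hei, hfd_d] at h2
                  omega)]
        · have hmod : ¬ PySem.Int.mod area i = 0 := by
            rw [PySem.Int.mod_eq_zero_iff_dvd]; exact hdv
          have hbw : bw area (n+1) = d := by
            rw [hbwdef, if_neg (by rintro ⟨h, -⟩; exact hdv h)]
          simp only [List.foldl, aStep, hmod, if_false]
          rw [hbw]

-- ===== VERDICT (by name: the statement is the Claim_ definition above) =====
theorem constructRectangle_spec : Claim_equal_constructRectangle := by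
  intro area _
  unfold Spec_constructRectangle constructRectangle constructRectangle_alt
  rcases lt_trichotomy area 1 with hlt | heq | hgt
  · -- area ≤ 0: empty range on the A side, early [] on the B side
    rw [if_neg (by omega), if_pos (by omega)]
    rw [PySem.List.pyRange_one_eq_nil (by omega)]
    rfl
  · -- area = 1
    subst heq
    rw [if_pos rfl, if_neg (by omega)]
    decide
  · -- area ≥ 2
    have h2 : 2 ≤ area := by omega
    rw [if_neg (by omega), if_neg (by omega)]
    set n : Nat := (area - 1).toNat with hn
    have hcast : (n : Int) + 1 = area := by omega
    have hA := A_fold area h2 n (by omega) (by omega)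
    rw [hcast] at hA
    rw [hA]
    have hB : altLoop (area + 1).toNat area 1 1 = bw area n := by
      have h0 : bw area (((1:Int) - 1).toNat) = 1 := by norm_num [bw]
      rw [← h0]
      have hsq : area < ((n : Int) + 1) * ((n : Int) + 1) := by
        rw [hcast]; nlinarith
      exact altLoop_bw area (by omega) n hsq
        (area + 1).toNat 1 (by omega) (by omega) (by omega)
    rw [hB]
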